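-- pv_equiv track=rewrite | github.com/themdash135/all-star-astrology | backend/engines/pipeline/adapters/gematria.py | _count_theme_agreement
-- ===== SOURCE A (Python) =====
-- def _count_theme_agreement(corr_themes: list[tuple[str, int | None, str]]) -> int:
--     """Count how many correspondence layers share similar theme keywords.
--     Returns the max number of layers that agree on at least one keyword."""
--     if len(corr_themes) < 2:
--         return 0
--     # Extract keywords from each layer's theme
--     from collections import Counter
--     keyword_layers: Counter[str] = Counter()
--     for _layer, _root, theme in corr_themes:
--         words = set(theme.lower().split())
--         # Count each keyword once per layer (not per occurrence)
--         for w in words: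
--             if len(w) > 3:  # skip short words
--                 keyword_layers[w] += 1
--     if not keyword_layers:
--         return 0
--     return keyword_layers.most_common(1)[0][1]
-- ===== SOURCE B (Python) =====
-- def _count_theme_agreement(corr_themes: list[tuple[str, int | None, str]]) -> int:
--     """Count how many correspondence layers share similar theme keywords.
--     Returns the max number of layers that agree on at least one keyword."""
--     if len(corr_themes) < 2:
--         return 0
--     flat = []
--     for _layer, _root, theme in corr_themes:
--         for w in set(theme.lower().split()):
--             if len(w) > 3:
--                 flat.append(w)
--     flat.sort()
--     best = 0
--     run = 0
--     prev = None
--     for w in flat: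
--         run = run + 1 if w == prev else 1
--         if run > best:
--             best = run
--         prev = w
--     return best
-- ===== Notes on version B (the rewrite author's own statement) =====
-- stated objective: alternative
-- what changed: Replaces the Counter histogram plus most_common(1) with sort-then-scan: flatten the per-layer long keywords into one list, sort it, and find the longest run of equal adjacent words in a single linear pass (no dictionary at all).
import Mathlib
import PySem

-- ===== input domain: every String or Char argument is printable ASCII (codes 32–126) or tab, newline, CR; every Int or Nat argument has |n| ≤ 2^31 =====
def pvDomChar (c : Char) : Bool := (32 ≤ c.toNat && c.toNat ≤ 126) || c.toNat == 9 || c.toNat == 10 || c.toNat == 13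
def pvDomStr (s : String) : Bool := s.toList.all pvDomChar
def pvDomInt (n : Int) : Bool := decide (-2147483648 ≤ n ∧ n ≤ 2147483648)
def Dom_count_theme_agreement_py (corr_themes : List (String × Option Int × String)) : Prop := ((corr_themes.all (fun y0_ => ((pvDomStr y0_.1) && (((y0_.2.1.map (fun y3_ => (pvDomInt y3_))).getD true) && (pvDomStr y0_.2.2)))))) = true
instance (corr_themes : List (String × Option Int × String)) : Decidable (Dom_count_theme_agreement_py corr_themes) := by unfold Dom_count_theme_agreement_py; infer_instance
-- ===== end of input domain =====

-- B replaces A's Counter histogram + most_common(1) by sort-then-scan: flatten the per-layer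
-- long keywords, sort the flat list, and return the longest run of equal adjacent words
-- found in one linear pass (no dictionary). Alternative algorithm, similar cost.

-- ===== PORT A =====
def count_theme_agreement_py (corr_themes : List (String × Option Int × String)) : Int :=
  if corr_themes.length < 2 then 0
  else
    let keyword_layers : PySem.Dict String Int :=
      corr_themes.foldl (fun d y =>
        let words : PySem.Set String :=
          PySem.Set.ofList (PySem.Str.split₀ (PySem.Str.lower y.2.2))
        words.foldl (fun d w =>
          if 3 < PySem.Str.len w then d.modify w 0 (· + 1) else d) d) PySem.Dict.empty
    if keyword_layers.size = 0 then 0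
    else
      -- most_common(1)[0][1]: head of the items sorted by count descending, its count
      match PySem.List.sorted keyword_layers.items (fun p => p.2) true with
      | [] => 0
      | p :: _ => p.2

-- ===== PORT B =====
-- one scan step of B's run-counting loop: state (best, run, prev)
def pvScanStep (s : Int × Int × Option String) (w : String) : Int × Int × Option String :=
  let run : Int := if some w = s.2.2 then s.2.1 + 1 else 1
  (if s.1 < run then run else s.1, run, some w)

def count_theme_agreement_py_alt (corr_themes : List (String × Option Int × String)) : Int :=
  if corr_themes.length < 2 then 0
  else
    let flat : List String :=
      corr_themes.foldl (fun acc y =>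
        (PySem.Set.ofList (PySem.Str.split₀ (PySem.Str.lower y.2.2))).foldl
          (fun acc w => if 3 < PySem.Str.len w then acc ++ [w] else acc) acc) []
    let sortedFlat := PySem.List.sorted flat (fun w => w) false
    (sortedFlat.foldl pvScanStep (0, 0, none)).1

-- ===== PRECONDITION & SPEC =====
def Spec_count_theme_agreement_py (corr_themes : List (String × Option Int × String)) (out : Int) : Prop := out = count_theme_agreement_py_alt corr_themes
instance (corr_themes : List (String × Option Int × String)) (out : Int) : Decidable (Spec_count_theme_agreement_py corr_themes out) := by unfold Spec_count_theme_agreement_py; infer_instance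

-- ===== CLAIM (what is proved, stated in full; the proofs are below) =====
def Claim_equal_count_theme_agreement_py : Prop := ∀ (corr_themes : List (String × Option Int × String)), Dom_count_theme_agreement_py corr_themes → Spec_count_theme_agreement_py corr_themes (count_theme_agreement_py corr_themes)

-- ===== LEMMAS AND PROOFS =====

-- the largest multiplicity occurring in l (0 for the empty list)
def pvMaxCount (l : List String) : Int :=
  (l.map (fun w => (l.count w : Int))).foldl max 0

-- a nested loop that folds each g x in turn is the fold over the flattened list
theorem pv_foldl_flatMap {α β γ : Type} (g : α → List β) (f : γ → β → γ) :
    ∀ (l : List α) (init : γ),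
      l.foldl (fun acc x => (g x).foldl f acc) init = (l.flatMap g).foldl f init := by
  intro l
  induction l with
  | nil => intro init; rfl
  | cons x t ih =>
      intro init
      simp [List.foldl_cons, List.flatMap_cons, List.foldl_append, ih]

theorem pv_foldl_max_le : ∀ (l : List Int) (a B : Int), a ≤ B → (∀ x ∈ l, x ≤ B) →
    l.foldl max a ≤ B := by
  intro l
  induction l with
  | nil => intro a B ha _; exact ha
  | cons x t ih =>
      intro a B ha h
      exact ih _ _ (max_le ha (h x List.mem_cons_self)) (fun y hy => h y (List.mem_cons_of_mem _ hy))

theorem pv_foldl_max_init (l : List Int) : ∀ a b : Int,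
    l.foldl max (max a b) = max a (l.foldl max b) := by
  induction l with
  | nil => intro a b; rfl
  | cons x t ih =>
      intro a b
      simp only [List.foldl_cons, max_assoc, ih]

theorem pv_foldl_max_replicate (n : Nat) (hn : 1 ≤ n) (a c : Int) :
    (List.replicate n c).foldl max a = max a c := by
  induction n generalizing a with
  | zero => omega
  | succ m ih =>
      rcases Nat.eq_zero_or_pos m with hm | hm
      · subst hm; simp
      · simp only [List.replicate_succ, List.foldl_cons, ih hm]
        rw [max_assoc, max_self]

theorem pv_count_le_maxCount (l : List String) (w : String) (hw : w ∈ l) :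
    (l.count w : Int) ≤ pvMaxCount l := by
  exact (PySem.List.le_foldl_max _ _).2 _ (List.mem_map_of_mem hw)

theorem pv_maxCount_le (l : List String) (B : Int) (hB : 0 ≤ B)
    (h : ∀ w ∈ l, (l.count w : Int) ≤ B) : pvMaxCount l ≤ B := by
  refine pv_foldl_max_le _ _ _ hB ?_
  intro x hx
  rcases List.mem_map.mp hx with ⟨w, hw, rfl⟩
  exact h w hw

theorem pv_maxCount_nonneg (l : List String) : 0 ≤ pvMaxCount l :=
  (PySem.List.le_foldl_max _ _).1

theorem pv_maxCount_perm {l m : List String} (h : l.Perm m) : pvMaxCount l = pvMaxCount m := by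
  have key : ∀ {l m : List String}, l.Perm m → pvMaxCount l ≤ pvMaxCount m := by
    intro l m h
    refine pv_maxCount_le _ _ (pv_maxCount_nonneg m) ?_
    intro w hw
    rw [h.count_eq]
    exact pv_count_le_maxCount m w (h.mem_iff.mp hw)
  exact le_antisymm (key h) (key h.symm)

theorem pv_maxCount_replicate_append (n : Nat) (hn : 1 ≤ n) (p : String) (m : List String)
    (hp : p ∉ m) : pvMaxCount (List.replicate n p ++ m) = max (n : Int) (pvMaxCount m) := by
  unfold pvMaxCount
  have hcp : (List.replicate n p ++ m).count p = n := by
    simp [List.count_append, List.count_eq_zero_of_not_mem hp]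
  have hcm : ∀ w ∈ m, (List.replicate n p ++ m).count w = m.count w := by
    intro w hw
    have hwp : w ≠ p := fun h => hp (h ▸ hw)
    simp [List.count_append, List.count_replicate, Ne.symm hwp]
  rw [List.map_append, List.map_replicate, hcp, List.foldl_append,
      pv_foldl_max_replicate n hn, List.map_congr_left (fun w hw => by rw [hcm w hw]),
      max_comm (0 : Int), pv_foldl_max_init]

-- run-scan over a sorted tail: invariant form
theorem pv_maxCount_replicate (n : Nat) (hn : 1 ≤ n) (p : String) :
    pvMaxCount (List.replicate n p) = (n : Int) := by
  unfold pvMaxCount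
  rw [List.map_replicate, List.count_replicate_self, pv_foldl_max_replicate n hn]
  exact max_eq_right (by positivity)

theorem pv_scan_spec (m : List String) : ∀ (best : Int) (n : Nat) (p : String),
    m.Pairwise (· ≤ ·) → (∀ x ∈ m, p ≤ x) → 1 ≤ n → (n : Int) ≤ best →
    (m.foldl pvScanStep (best, (n : Int), some p)).1
      = max best (pvMaxCount (List.replicate n p ++ m)) := by
  induction m with
  | nil =>
      intro best n p _ _ hn hb
      simp only [List.foldl_nil, List.append_nil, pv_maxCount_replicate n hn p]
      omega
  | cons w t ih =>
      intro best n p hpw hall hn hb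
      rcases List.pairwise_cons.mp hpw with ⟨hwle, hpt⟩
      by_cases hwp : w = p
      · subst hwp
        have hstep : pvScanStep (best, (n : Int), some w) w
            = (max best ((n : Int) + 1), (n : Int) + 1, some w) := by
          simp [pvScanStep, Prod.ext_iff]
          omega
        have hlist : List.replicate (n + 1) w ++ t = List.replicate n w ++ w :: t := by
          rw [List.replicate_succ', List.append_assoc, List.singleton_append]
        have hIH := ih (max best ((n : Int) + 1)) (n + 1) w hpt hwle (by omega)
          (by push_cast; omega)
        push_cast at hIH
        have hmem : w ∈ List.replicate (n + 1) w ++ t :=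
          List.mem_append_left _ (List.mem_replicate.mpr ⟨by omega, rfl⟩)
        have hcount : ((n : Int) + 1) ≤ ((List.replicate (n + 1) w ++ t).count w : Int) := by
          rw [List.count_append, List.count_replicate_self]
          push_cast
          omega
        have hle2 : ((n : Int) + 1) ≤ pvMaxCount (List.replicate (n + 1) w ++ t) :=
          le_trans hcount (pv_count_le_maxCount _ _ hmem)
        rw [List.foldl_cons, hstep, hIH, ← hlist]
        omega
      · have hpltw : p < w := lt_of_le_of_ne (hall w List.mem_cons_self) (fun h => hwp h.symm)
        have hstep : pvScanStep (best, (n : Int), some p) w = (best, 1, some w) := by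
          simp [pvScanStep, Prod.ext_iff, hwp]
          omega
        have hpnot : p ∉ w :: t := by
          intro hm
          rcases List.mem_cons.mp hm with h | h
          · exact absurd h (ne_of_lt hpltw)
          · exact absurd rfl (ne_of_lt (lt_of_lt_of_le hpltw (hwle p h)))
        have hIH := ih best 1 w hpt hwle le_rfl (by exact_mod_cast (by omega : (1:Int) ≤ best))
        rw [List.foldl_cons, hstep]
        push_cast at hIH
        rw [List.singleton_append] at hIH
        rw [hIH, pv_maxCount_replicate_append n hn p (w :: t) hpnot]
        omega

theorem pv_flat_eq (l : List (String × Option Int × String)) : ∀ acc : List String,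
    l.foldl (fun acc y =>
      (PySem.Set.ofList (PySem.Str.split₀ (PySem.Str.lower y.2.2))).foldl
        (fun acc w => if 3 < PySem.Str.len w then acc ++ [w] else acc) acc) acc
    = acc ++ l.flatMap (fun y =>
        (PySem.Set.ofList (PySem.Str.split₀ (PySem.Str.lower y.2.2))).filter
          (fun w => decide (3 < PySem.Str.len w))) := by
  induction l with
  | nil => intro acc; simp
  | cons y t ih =>
      intro acc
      rw [List.foldl_cons, PySem.List.foldl_append_ite_eq_filter, ih, List.flatMap_cons,
          List.append_assoc]

theorem count_theme_agreement_py_spec : Claim_equal_count_theme_agreement_py := by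
  intro ct _
  unfold Spec_count_theme_agreement_py count_theme_agreement_py count_theme_agreement_py_alt
  by_cases hlen : ct.length < 2
  · simp [hlen]
  · simp only [hlen, if_false]
    set g : (String × Option Int × String) → List String := fun y =>
      (PySem.Set.ofList (PySem.Str.split₀ (PySem.Str.lower y.2.2))).filter
        (fun w => decide (3 < PySem.Str.len w)) with hg
    have hd : (ct.foldl (fun d y =>
        (PySem.Set.ofList (PySem.Str.split₀ (PySem.Str.lower y.2.2))).foldl (fun d w =>
          if 3 < PySem.Str.len w then d.modify w 0 (· + 1) else d) d) PySem.Dict.empty)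
        = PySem.Dict.counter (ct.flatMap g) := by
      simp only [PySem.List.foldl_ite_eq_foldl_filter]
      rw [pv_foldl_flatMap]
      rfl
    have hflat : (ct.foldl (fun acc y =>
        (PySem.Set.ofList (PySem.Str.split₀ (PySem.Str.lower y.2.2))).foldl
          (fun acc w => if 3 < PySem.Str.len w then acc ++ [w] else acc) acc) ([] : List String))
        = ct.flatMap g := by
      rw [pv_flat_eq ct [], List.nil_append, hg]
    rw [hd, hflat]
    generalize ct.flatMap g = flat
    cases flat with
    | nil => rfl
    | cons w rest =>
      -- ===== A side: the returned count is pvMaxCount (w :: rest) =====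
      have hitems : (PySem.Dict.counter (w :: rest)).items
          = (PySem.Set.ofList (w :: rest)).map (fun k => (k, ((w :: rest).count k : Int))) :=
        PySem.Dict.items_counter _
      have hwmem : w ∈ PySem.Set.ofList (w :: rest) :=
        (PySem.Set.mem_ofList _ _).mpr List.mem_cons_self
      have hne : (PySem.Dict.counter (w :: rest)).items ≠ [] := by
        rw [hitems]
        intro h
        have hm := List.mem_map_of_mem (f := fun k => (k, ((w :: rest).count k : Int))) hwmem
        rw [h] at hm
        exact List.not_mem_nil hm
      have hsz : ¬ (PySem.Dict.counter (w :: rest)).size = 0 := by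
        simpa [PySem.Dict.size, List.length_eq_zero_iff] using hne
      rw [if_neg hsz]
      cases hs : PySem.List.sorted (PySem.Dict.counter (w :: rest)).items (fun p => p.2) true with
      | nil => exact absurd ((PySem.List.sorted_eq_nil_iff _ _ _).mp hs) hne
      | cons p tl =>
        have hub : ∀ y ∈ (PySem.Dict.counter (w :: rest)).items, y.2 ≤ p.2 :=
          PySem.List.key_head_sorted_rev_ge _ _ hs
        have hp : p ∈ (PySem.Dict.counter (w :: rest)).items :=
          (PySem.List.mem_sorted _ _ _ _).mp (hs ▸ List.mem_cons_self)
        rcases List.mem_map.mp (hitems ▸ hp) with ⟨k, hk, hkp⟩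
        have hA : p.2 = pvMaxCount (w :: rest) := by
          refine le_antisymm ?_ ?_
          · rw [← hkp]
            exact pv_count_le_maxCount _ _ ((PySem.Set.mem_ofList _ _).mp hk)
          · refine pv_maxCount_le _ _ ?_ ?_
            · rw [← hkp]; positivity
            · intro v hv
              have hmm : (v, ((w :: rest).count v : Int))
                  ∈ (PySem.Dict.counter (w :: rest)).items := by
                rw [hitems]
                exact List.mem_map_of_mem ((PySem.Set.mem_ofList _ _).mpr hv)
              exact hub _ hmm
        -- ===== B side: the run scan over the sorted list is pvMaxCount (w :: rest) =====
        cases hsf : PySem.List.sorted (w :: rest) (fun w => w) false with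
        | nil => exact absurd ((PySem.List.sorted_eq_nil_iff _ _ _).mp hsf) (by simp)
        | cons w' t' =>
          have hpair : (w' :: t').Pairwise (fun a b => a ≤ b) := by
            have := PySem.List.sorted_pairwise (w :: rest) (fun w => w)
            rwa [hsf] at this
          rcases List.pairwise_cons.mp hpair with ⟨hwle, ht'⟩
          have hperm : (w' :: t').Perm (w :: rest) := by
            have := PySem.List.sorted_perm (w :: rest) (fun w => w) false
            rwa [hsf] at this
          have hstep0 : pvScanStep (0, 0, none) w' = (1, 1, some w') := by
            simp [pvScanStep]
          have hscan := pv_scan_spec t' 1 1 w' ht' hwle le_rfl (by norm_num)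
          push_cast at hscan
          rw [List.singleton_append] at hscan
          have h1le : (1 : Int) ≤ pvMaxCount (w' :: t') := by
            refine le_trans ?_ (pv_count_le_maxCount (w' :: t') w' List.mem_cons_self)
            have : 0 < (w' :: t').count w' := List.count_pos_iff.mpr List.mem_cons_self
            exact_mod_cast this
          rw [List.foldl_cons, hstep0, hscan]
          show p.2 = max 1 (pvMaxCount (w' :: t'))
          rw [hA, pv_maxCount_perm hperm] at *
          omega
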